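-- pv_equiv track=rewrite | github.com/leo-hammett/Jelly | output/src/text_utils.py | _build_norm_map
-- ===== SOURCE A (Python) =====
-- import unicodedata
--
-- def _normalize_char(ch: str) -> str:
--     """
--     Return the normalized form of a single character (may be empty or
--     multi-character, e.g. ß → 'ss').
--     """
--     nfc = unicodedata.normalize("NFC", ch)
--     casefolded = nfc.casefold()
--     nfd = unicodedata.normalize("NFD", casefolded)
--     return "".join(c for c in nfd if unicodedata.category(c) != "Mn")
--
-- def _build_norm_map(text: str):
--     """
--     Build a normalized form of *text* and a parallel array that maps each
--     position in the normalized string back to an index in the original string.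
--
--     Returns
--     -------
--     norm_text : str
--         The normalized string (whitespace collapsed, stripped).
--     orig_positions : list[int]
--         ``orig_positions[i]`` is the index in *text* that contributed the
--         character ``norm_text[i]``.
--     """
--     # Phase 1: expand each original character to its normalized sub-chars,
--     # keeping track of the originating index.
--     expanded: list[tuple[int, str]] = []  # (orig_idx, norm_char)
--     for orig_idx, ch in enumerate(text):
--         norm_chars = _normalize_char(ch)
--         for c in norm_chars:
--             expanded.append((orig_idx, c))
--
--     # Phase 2: collapse whitespace runs (isspace() covers Unicode whitespace)
--     collapsed: list[tuple[int, str]] = []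
--     in_ws = False
--     for orig_idx, c in expanded:
--         if c.isspace():
--             if not in_ws:
--                 collapsed.append((orig_idx, " "))
--                 in_ws = True
--             # else skip additional whitespace characters
--         else:
--             collapsed.append((orig_idx, c))
--             in_ws = False
--
--     # Phase 3: strip leading/trailing spaces
--     lo = 0
--     hi = len(collapsed)
--     while lo < hi and collapsed[lo][1] == " ":
--         lo += 1
--     while hi > lo and collapsed[hi - 1][1] == " ":
--         hi -= 1
--     collapsed = collapsed[lo:hi]
--
--     norm_text = "".join(c for _, c in collapsed)
--     orig_positions = [idx for idx, _ in collapsed]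
--     return norm_text, orig_positions
-- ===== SOURCE B (Python) =====
-- import unicodedata
--
--
-- def _normalize_char(ch: str) -> str:
--     """
--     Return the normalized form of a single character (may be empty or
--     multi-character, e.g. ss -> 'ss').
--     """
--     nfc = unicodedata.normalize("NFC", ch)
--     casefolded = nfc.casefold()
--     nfd = unicodedata.normalize("NFD", casefolded)
--     return "".join(c for c in nfd if unicodedata.category(c) != "Mn")
--
--
-- def _build_norm_map(text: str):
--     """Single pass: normalize each char and collapse/strip whitespace on the
--     fly with a deferred pending-space, instead of A's three phases."""
--     result = []            # (orig_idx, norm_char), final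
--     emitted = False        # some non-space output exists
--     pending_space = False  # a collapsed space is waiting to be flushed
--     pending_idx = 0        # orig index of first whitespace char of current run
--     for orig_idx, ch in enumerate(text):
--         for c in _normalize_char(ch):
--             if c.isspace():
--                 if not pending_space and emitted:
--                     pending_space = True
--                     pending_idx = orig_idx
--             else:
--                 if pending_space:
--                     result.append((pending_idx, " "))
--                     pending_space = False
--                 result.append((orig_idx, c))
--                 emitted = True
--     # a pending space at the end is never flushed: trailing strip for free
--     norm_text = "".join(c for _, c in result)
--     orig_positions = [idx for idx, _ in result]
--     return norm_text, orig_positions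
-- ===== Notes on version B (the rewrite author's own statement) =====
-- stated objective: simpler
-- what changed: Replaces A's three phases (expand to a list, collapse whitespace with an in_ws flag, then two index-based while loops that strip the ends and slice) by one pass with a deferred pending-space that is only flushed before a non-space character, so stripping needs no post-processing.
import Mathlib
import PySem

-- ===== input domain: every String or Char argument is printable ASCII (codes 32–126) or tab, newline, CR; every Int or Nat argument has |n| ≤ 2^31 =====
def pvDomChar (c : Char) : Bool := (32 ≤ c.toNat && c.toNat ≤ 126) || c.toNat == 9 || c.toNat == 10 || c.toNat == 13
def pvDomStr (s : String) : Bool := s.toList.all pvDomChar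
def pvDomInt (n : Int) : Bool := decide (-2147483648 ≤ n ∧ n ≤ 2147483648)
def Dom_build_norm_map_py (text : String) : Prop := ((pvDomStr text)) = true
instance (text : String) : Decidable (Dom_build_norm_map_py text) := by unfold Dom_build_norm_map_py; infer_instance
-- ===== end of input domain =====

-- B replaces A's three phases (expand, collapse with an in_ws flag, index-based end-strip)
-- by one pass with a deferred pending-space; same cost, simpler structure.

-- ===== PORT A =====
-- _normalize_char: on the ASCII domain NFC/NFD are the identity, no char has
-- category Mn, and casefold of one ASCII char is its single lowercase char,
-- so the helper returns exactly one lowered character (exact on Dom).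
def pvNormChar (ch : Char) : List Char := [PySem.Chars.lowerChar ch]

-- Phase-3 while loops of A, transliterated on indices.
def pvLoF (l : List (Int × Char)) (lo hi : Nat) : Nat :=
  if lo < hi then
    (if (l.getD lo (0, ' ')).2 == ' ' then pvLoF l (lo + 1) hi else lo)
  else lo
termination_by hi - lo

def pvHiF (l : List (Int × Char)) (lo hi : Nat) : Nat :=
  if lo < hi then
    (if (l.getD (hi - 1) (0, ' ')).2 == ' ' then pvHiF l lo (hi - 1) else hi)
  else hi
termination_by hi

def build_norm_map_py (text : String) : String × List Int :=
  -- Phase 1: expand each char to its normalized sub-chars with its index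
  let expanded : List (Int × Char) :=
    (PySem.List.enumerate text.toList 0).foldl
      (fun acc p => (pvNormChar p.2).foldl (fun a c => a ++ [(p.1, c)]) acc) []
  -- Phase 2: collapse whitespace runs
  let st : List (Int × Char) × Bool :=
    expanded.foldl
      (fun st p =>
        if PySem.Chars.isspace p.2 then
          (if st.2 then st else (st.1 ++ [(p.1, ' ')], true))
        else (st.1 ++ [p], false))
      ([], false)
  -- Phase 3: strip leading/trailing spaces
  let lo := pvLoF st.1 0 st.1.length
  let hi := pvHiF st.1 lo st.1.length
  let collapsed := PySem.List.slice st.1 (some (lo : Int)) (some (hi : Int))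
  (String.ofList (collapsed.map (·.2)), collapsed.map (·.1))

-- ===== PORT B =====
-- state: (emitted, pending_space, pending_idx, result)
def build_norm_map_py_alt (text : String) : String × List Int :=
  let st : Bool × Bool × Int × List (Int × Char) :=
    (PySem.List.enumerate text.toList 0).foldl
      (fun st p =>
        (pvNormChar p.2).foldl
          (fun (st : Bool × Bool × Int × List (Int × Char)) c =>
            if PySem.Chars.isspace c then
              (if ¬ st.2.1 ∧ st.1 then (st.1, true, p.1, st.2.2.2) else st)
            else
              (true, false, st.2.2.1,
                (if st.2.1 then st.2.2.2 ++ [(st.2.2.1, ' ')] else st.2.2.2) ++ [(p.1, c)]))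
          st)
      (false, false, (0 : Int), ([] : List (Int × Char)))
  let result := st.2.2.2
  (String.ofList (result.map (·.2)), result.map (·.1))

-- ===== PRECONDITION & SPEC =====
def Spec_build_norm_map_py (text : String) (out : String × List Int) : Prop := out = build_norm_map_py_alt text
instance (text : String) (out : String × List Int) : Decidable (Spec_build_norm_map_py text out) := by unfold Spec_build_norm_map_py; infer_instance

-- ===== CLAIM (what is proved, stated in full; the proofs are below) =====
def Claim_equal_build_norm_map_py : Prop := ∀ (text : String), Dom_build_norm_map_py text → Spec_build_norm_map_py text (build_norm_map_py text)

-- ===== LEMMAS AND PROOFS =====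

-- Python's `collapsed[i][1] == " "` test
def pvSp (p : Int × Char) : Bool := p.2 == ' '

def pvLstrip (l : List (Int × Char)) : List (Int × Char) := l.dropWhile pvSp
def pvRstrip (l : List (Int × Char)) : List (Int × Char) := (l.reverse.dropWhile pvSp).reverse

-- recursive form of A's collapse fold
def pvColR : Bool → List (Int × Char) → List (Int × Char)
  | _, [] => []
  | b, p :: rest =>
    if PySem.Chars.isspace p.2 then
      (if b then pvColR true rest else (p.1, ' ') :: pvColR true rest)
    else p :: pvColR false rest

-- final in_ws flag of A's collapse fold
def pvColW : Bool → List (Int × Char) → Bool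
  | b, [] => b
  | _, p :: rest =>
    if PySem.Chars.isspace p.2 then pvColW true rest else pvColW false rest

-- A's collapse step / B's step on one expanded (idx, char) element
def pvAStep (st : List (Int × Char) × Bool) (p : Int × Char) : List (Int × Char) × Bool :=
  if PySem.Chars.isspace p.2 then
    (if st.2 then st else (st.1 ++ [(p.1, ' ')], true))
  else (st.1 ++ [p], false)

def pvBStep (st : Bool × Bool × Int × List (Int × Char)) (p : Int × Char) :
    Bool × Bool × Int × List (Int × Char) :=
  if PySem.Chars.isspace p.2 then
    (if ¬ st.2.1 ∧ st.1 then (st.1, true, p.1, st.2.2.2) else st)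
  else
    (true, false, st.2.2.1,
      (if st.2.1 then st.2.2.2 ++ [(st.2.2.1, ' ')] else st.2.2.2) ++ [p])

theorem pv_foldl_append_map {α β : Type} (l : List α) (g : α → β) (acc : List β) :
    l.foldl (fun a x => a ++ [g x]) acc = acc ++ l.map g := by
  induction l generalizing acc with
  | nil => simp
  | cons x xs ih => simp [ih]

theorem pv_collapse_eq (es : List (Int × Char)) :
    ∀ (acc : List (Int × Char)) (b : Bool),
      es.foldl pvAStep (acc, b) = (acc ++ pvColR b es, pvColW b es) := by
  induction es with
  | nil => intro acc b; simp [pvColR, pvColW]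
  | cons p rest ih =>
    intro acc b
    by_cases hs : PySem.Chars.isspace p.2
    · by_cases hb : b
      · simp [pvAStep, hs, hb, pvColR, pvColW, ih]
      · simp [pvAStep, hs, hb, pvColR, pvColW, ih]
    · simp [pvAStep, hs, pvColR, pvColW, ih]

theorem pv_dropWhile_eq_drop {α : Type} (p : α → Bool) (l : List α) :
    l.dropWhile p = l.drop (l.takeWhile p).length := by
  induction l with
  | nil => rfl
  | cons x xs ih => by_cases h : p x <;> simp [h, ih]

theorem pv_take_succ {α : Type} [Inhabited α] (l : List α) (n : Nat) (h : n < l.length) :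
    l.take (n + 1) = l.take n ++ [l[n]] := by
  rw [List.take_add_one]; simp [List.getElem?_eq_getElem h]

theorem pv_takeWhile_len_le {α : Type} (p : α → Bool) (l : List α) :
    (l.takeWhile p).length ≤ l.length := by
  induction l with
  | nil => simp
  | cons x xs ih =>
    by_cases h : p x
    · simp [h]; omega
    · simp [h]


theorem pvLo_spec (l : List (Int × Char)) (lo : Nat) :
    pvLoF l lo l.length = lo + ((l.drop lo).takeWhile pvSp).length := by
  have H : ∀ n lo, l.length - lo ≤ n →
      pvLoF l lo l.length = lo + ((l.drop lo).takeWhile pvSp).length := by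
    intro n
    induction n with
    | zero =>
      intro lo h
      have hnl : ¬ lo < l.length := by omega
      rw [pvLoF]
      simp [hnl, List.drop_eq_nil_of_le (by omega : l.length ≤ lo)]
    | succ n ih =>
      intro lo h
      rw [pvLoF]
      by_cases hlt : lo < l.length
      · have hd : l.drop lo = l[lo] :: l.drop (lo + 1) := List.drop_eq_getElem_cons hlt
        have hg : l.getD lo (0, ' ') = l[lo] := by
          simp [List.getD, List.getElem?_eq_getElem hlt]
        rw [if_pos hlt, hg, hd]
        by_cases hsp : l[lo].2 == ' '
        · have hps : pvSp l[lo] = true := by simpa [pvSp] using hsp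
          rw [if_pos hsp, ih (lo + 1) (by omega), List.takeWhile_cons, if_pos hps,
            List.length_cons]
          omega
        · have hps : pvSp l[lo] = false := by simpa [pvSp] using hsp
          rw [if_neg hsp, List.takeWhile_cons]
          simp [hps]
      · rw [if_neg hlt]
        have : l.drop lo = [] := List.drop_eq_nil_of_le (by omega)
        simp [this]
  exact H _ lo le_rfl

theorem pvHi_spec (l : List (Int × Char)) :
    ∀ (hi lo : Nat), lo ≤ hi → hi ≤ l.length →
      pvHiF l lo hi = hi - (((l.drop lo).take (hi - lo)).reverse.takeWhile pvSp).length := by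
  intro hi
  induction hi with
  | zero => intro lo h1 h2; rw [pvHiF]; simp
  | succ n ih =>
    intro lo h1 h2
    rw [pvHiF]
    by_cases hlt : lo < n + 1
    · have hx : n < l.length := by omega
      have hg : l.getD (n + 1 - 1) (0, ' ') = l[n] := by
        simp [List.getD, List.getElem?_eq_getElem hx]
      have hlen : n - lo < (l.drop lo).length := by simp [List.length_drop]; omega
      have hidx : (l.drop lo)[n - lo]'hlen = l[n] := by
        rw [List.getElem_drop]
        congr 1
        omega
      have hm : (l.drop lo).take (n + 1 - lo) = (l.drop lo).take (n - lo) ++ [l[n]] := by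
        have he : n + 1 - lo = (n - lo) + 1 := by omega
        rw [he, pv_take_succ _ _ hlen, hidx]
      rw [if_pos hlt, hg, hm]
      by_cases hsp : l[n].2 == ' '
      · have hps : pvSp l[n] = true := by simpa [pvSp] using hsp
        rw [if_pos hsp]
        have he : n + 1 - 1 = n := rfl
        rw [he, ih lo (by omega) (by omega), List.reverse_append, List.reverse_singleton,
          List.singleton_append, List.takeWhile_cons, if_pos hps, List.length_cons]
        omega
      · have hps : pvSp l[n] = false := by simpa [pvSp] using hsp
        rw [if_neg hsp, List.reverse_append, List.reverse_singleton, List.singleton_append,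
          List.takeWhile_cons]
        simp [hps]
    · have he : lo = n + 1 := by omega
      rw [if_neg hlt]
      simp [he]

theorem pv_strip_eq (l : List (Int × Char)) :
    PySem.List.slice l (some ((pvLoF l 0 l.length : Nat) : Int))
      (some ((pvHiF l (pvLoF l 0 l.length) l.length : Nat) : Int)) =
    pvRstrip (pvLstrip l) := by
  have hlo : pvLoF l 0 l.length = (l.takeWhile pvSp).length := by
    simpa using pvLo_spec l 0
  have hlo_le : (l.takeWhile pvSp).length ≤ l.length := pv_takeWhile_len_le _ _
  set tl := (l.takeWhile pvSp).length with htl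
  have hdropfull : (l.drop tl).take (l.length - tl) = l.drop tl := by
    apply List.take_of_length_le; simp [List.length_drop]
  have hm : l.drop tl = pvLstrip l := (pv_dropWhile_eq_drop pvSp l).symm
  set m := pvLstrip l with hmdef
  have hmlen : m.length = l.length - tl := by rw [← hm]; simp [List.length_drop]
  set tw := (m.reverse.takeWhile pvSp).length with htw
  have hhi : pvHiF l tl l.length = l.length - tw := by
    rw [pvHi_spec l l.length tl hlo_le le_rfl, hdropfull, hm]
  have htw_le : tw ≤ m.length := by
    calc tw ≤ m.reverse.length := pv_takeWhile_len_le _ _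
      _ = m.length := List.length_reverse
  rw [hlo, hhi, PySem.List.slice_natCast, hm]
  have harith : l.length - tw - tl = m.length - tw := by omega
  rw [harith]
  show m.take (m.length - tw) = pvRstrip m
  unfold pvRstrip
  rw [pv_dropWhile_eq_drop pvSp m.reverse, ← htw, List.drop_reverse, List.reverse_reverse]

-- pvRstrip eats any all-space suffix appended to a space-free-tail accumulator
theorem pv_dropWhile_all : ∀ (t : List (Int × Char)),
    (∀ q ∈ t, pvSp q = true) → t.dropWhile pvSp = [] := by
  intro t
  induction t with
  | nil => intro _; rfl
  | cons x xs ih =>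
    intro h
    have hx : pvSp x = true := h x (List.mem_cons_self)
    rw [List.dropWhile_cons, if_pos hx]
    exact ih (fun q hq => h q (List.mem_cons_of_mem x hq))

theorem pv_dropWhile_append_nil {α : Type} (p : α → Bool) (a b : List α)
    (h : a.dropWhile p = []) : (a ++ b).dropWhile p = b.dropWhile p := by
  induction a with
  | nil => rfl
  | cons x xs ih =>
    by_cases hx : p x
    · rw [List.dropWhile_cons, if_pos hx] at h
      rw [List.cons_append, List.dropWhile_cons, if_pos hx]
      exact ih h
    · rw [List.dropWhile_cons, if_neg hx] at h
      exact (List.cons_ne_nil _ _ h).elim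

theorem pv_P_concat (acc : List (Int × Char)) (x : Int × Char) (hx : pvSp x = false)
    (t : List (Int × Char)) (h : ∀ q ∈ t, pvSp q = true) :
    pvRstrip ((acc ++ [x]) ++ t) = acc ++ [x] := by
  unfold pvRstrip
  have h1 : t.reverse.dropWhile pvSp = [] :=
    pv_dropWhile_all t.reverse (fun q hq => h q (List.mem_reverse.mp hq))
  rw [List.reverse_append, List.reverse_append]
  simp only [List.reverse_singleton]
  rw [pv_dropWhile_append_nil pvSp t.reverse _ h1, List.singleton_append,
    List.dropWhile_cons, if_neg (by simp [hx])]
  simp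

theorem pv_isspace_space : PySem.Chars.isspace ' ' = true := by decide

theorem pv_sp_of_not_isspace (p : Int × Char) (h : ¬ PySem.Chars.isspace p.2) :
    pvSp p = false := by
  simp [pvSp]
  intro he
  exact h (by rw [he]; exact pv_isspace_space)

theorem pv_B2 (es : List (Int × Char)) :
    ∀ (pd : Bool) (pi : Int) (acc : List (Int × Char)),
      (∀ t, (∀ q ∈ t, pvSp q = true) → pvRstrip (acc ++ t) = acc) →
      (es.foldl pvBStep (true, pd, pi, acc)).2.2.2 =
        pvRstrip (acc ++ (if pd then [(pi, ' ')] else []) ++ pvColR pd es) := by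
  induction es with
  | nil =>
    intro pd pi acc H
    simp only [List.foldl_nil, pvColR, List.append_nil]
    rw [H]
    intro q hq
    cases pd <;> simp at hq
    · simp [hq, pvSp]
  | cons p rest ih =>
    intro pd pi acc H
    by_cases hs : PySem.Chars.isspace p.2
    · cases pd with
      | true =>
        have hstep : pvBStep (true, true, pi, acc) p = (true, true, pi, acc) := by
          simp [pvBStep, hs]
        rw [List.foldl_cons, hstep, ih true pi acc H]
        simp [pvColR, hs]
      | false =>
        have hstep : pvBStep (true, false, pi, acc) p = (true, true, p.1, acc) := by
          simp [pvBStep, hs]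
        rw [List.foldl_cons, hstep, ih true p.1 acc H]
        simp [pvColR, hs]
    · have hf : pvSp p = false := pv_sp_of_not_isspace p hs
      cases pd with
      | true =>
        have hstep : pvBStep (true, true, pi, acc) p =
            (true, false, pi, (acc ++ [(pi, ' ')]) ++ [p]) := by
          simp [pvBStep, hs]
        rw [List.foldl_cons, hstep,
          ih false pi ((acc ++ [(pi, ' ')]) ++ [p]) (fun t ht => pv_P_concat _ p hf t ht)]
        simp [pvColR, hs]
      | false =>
        have hstep : pvBStep (true, false, pi, acc) p = (true, false, pi, acc ++ [p]) := by
          simp [pvBStep, hs]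
        rw [List.foldl_cons, hstep,
          ih false pi (acc ++ [p]) (fun t ht => pv_P_concat acc p hf t ht)]
        simp [pvColR, hs]

theorem pv_B1 (es : List (Int × Char)) :
    ∀ (pi : Int),
      (es.foldl pvBStep (false, false, pi, [])).2.2.2 =
        pvRstrip (pvLstrip (pvColR true es)) := by
  induction es with
  | nil => intro pi; simp [pvColR, pvLstrip, pvRstrip]
  | cons p rest ih =>
    intro pi
    by_cases hs : PySem.Chars.isspace p.2
    · have hstep : pvBStep (false, false, pi, []) p = (false, false, pi, []) := by
        simp [pvBStep, hs]
      rw [List.foldl_cons, hstep, ih pi]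
      simp [pvColR, hs]
    · have hf : pvSp p = false := pv_sp_of_not_isspace p hs
      have hstep : pvBStep (false, false, pi, []) p = (true, false, pi, [p]) := by
        simp [pvBStep, hs]
      have hP : ∀ t, (∀ q ∈ t, pvSp q = true) → pvRstrip ([p] ++ t) = [p] := by
        intro t ht
        have := pv_P_concat [] p hf t ht
        simpa using this
      rw [List.foldl_cons, hstep, pv_B2 rest false pi [p] hP]
      simp [pvColR, hs, pvLstrip, hf]

theorem pv_lstrip_colR (es : List (Int × Char)) :
    pvLstrip (pvColR false es) = pvLstrip (pvColR true es) := by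
  cases es with
  | nil => rfl
  | cons p rest =>
    by_cases hs : PySem.Chars.isspace p.2
    · simp [pvColR, hs, pvLstrip, pvSp]
    · simp [pvColR, hs]

-- ===== VERDICT (by name: the statement is the Claim_ definition above) =====
theorem build_norm_map_py_spec : Claim_equal_build_norm_map_py := by
  unfold Claim_equal_build_norm_map_py
  intro text _
  unfold Spec_build_norm_map_py build_norm_map_py build_norm_map_py_alt
  set enum := PySem.List.enumerate text.toList 0 with henum
  set es : List (Int × Char) := enum.map (fun p => (p.1, PySem.Chars.lowerChar p.2)) with hes
  have hA1 : enum.foldl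
      (fun acc p => (pvNormChar p.2).foldl (fun a c => a ++ [(p.1, c)]) acc) [] = es := by
    have h1 : (fun (acc : List (Int × Char)) (p : Int × Char) =>
        (pvNormChar p.2).foldl (fun a c => a ++ [(p.1, c)]) acc)
        = fun acc p => acc ++ [(p.1, PySem.Chars.lowerChar p.2)] := by
      funext acc p; simp [pvNormChar]
    rw [h1, hes]
    simpa using pv_foldl_append_map enum (fun p => (p.1, PySem.Chars.lowerChar p.2)) []
  have hB1 : enum.foldl
      (fun st p => (pvNormChar p.2).foldl
        (fun (st : Bool × Bool × Int × List (Int × Char)) c =>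
          if PySem.Chars.isspace c then
            (if ¬ st.2.1 ∧ st.1 then (st.1, true, p.1, st.2.2.2) else st)
          else
            (true, false, st.2.2.1,
              (if st.2.1 then st.2.2.2 ++ [(st.2.2.1, ' ')] else st.2.2.2) ++ [(p.1, c)]))
        st)
      (false, false, (0 : Int), ([] : List (Int × Char)))
      = es.foldl pvBStep (false, false, (0 : Int), ([] : List (Int × Char))) := by
    rw [hes, List.foldl_map]
    rfl
  have hAfun : (fun (st : List (Int × Char) × Bool) (p : Int × Char) =>
      if PySem.Chars.isspace p.2 then (if st.2 then st else (st.1 ++ [(p.1, ' ')], true))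
      else (st.1 ++ [p], false)) = pvAStep := rfl
  simp only [hA1, hB1, hAfun, pv_collapse_eq es [] false, List.nil_append,
    pv_B1 es 0, pv_strip_eq (pvColR false es), pv_lstrip_colR es]
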